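-- pv_equiv track=rewrite | github.com/mkjsym/coding-test | YM/December/2024.12.15.py | solution
-- ===== SOURCE A (Python) =====
-- def solution(myString):
--     answer = ''
--
--     for i in range(len(myString)):
--         if (myString[i].lower() == 'a'):
--             answer += myString[i].upper()
--         else:
--             answer += myString[i].lower()
--
--     return answer
-- ===== SOURCE B (Python) =====
-- def solution(myString):
--     return myString.lower().replace('a', 'A')
-- ===== Notes on version B (the rewrite author's own statement) =====
-- stated objective: idiomatic
-- what changed: Replaces the explicit index loop with per-character if/else and string concatenation by two whole-string builtins: lower() then replace('a','A').
import Mathlib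
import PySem

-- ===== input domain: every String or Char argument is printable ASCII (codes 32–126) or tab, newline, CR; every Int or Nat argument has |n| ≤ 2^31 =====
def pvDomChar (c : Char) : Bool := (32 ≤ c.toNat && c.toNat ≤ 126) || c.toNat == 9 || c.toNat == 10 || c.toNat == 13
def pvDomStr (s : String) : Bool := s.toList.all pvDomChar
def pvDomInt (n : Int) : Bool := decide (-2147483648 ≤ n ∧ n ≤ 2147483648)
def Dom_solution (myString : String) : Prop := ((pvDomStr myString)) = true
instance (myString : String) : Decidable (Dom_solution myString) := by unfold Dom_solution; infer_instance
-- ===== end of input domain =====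

-- B replaces A's index loop with per-character if/else by two whole-string passes: lower() then replace('a','A') (idiomatic).


-- ===== PORT A =====
-- literal port of A's loop: for i in range(len(s)): if s[i].lower()=='a' then answer += s[i].upper() else answer += s[i].lower().
-- single-character .lower()/.upper() and the == 'a' comparison are ported through PySem.Chars.lowerChar/upperChar (exact).
def solution (myString : String) : String :=
  let chars := myString.toList
  String.ofList
    ((PySem.List.pyRange 0 (chars.length : Int) 1).foldl
      (fun acc i =>
        if PySem.Chars.lowerChar (PySem.List.pyGetD chars i ' ') = 'a' then
          acc ++ [PySem.Chars.upperChar (PySem.List.pyGetD chars i ' ')]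
        else
          acc ++ [PySem.Chars.lowerChar (PySem.List.pyGetD chars i ' ')]) [])

-- ===== PORT B =====
def solution_alt (myString : String) : String :=
  PySem.Str.replace (PySem.Str.lower myString) "a" "A"

-- ===== PRECONDITION & SPEC =====
def Spec_solution (myString : String) (out : String) : Prop := out = solution_alt myString
instance (myString : String) (out : String) : Decidable (Spec_solution myString out) := by unfold Spec_solution; infer_instance

-- ===== CLAIM (what is proved, stated in full; the proofs are below) =====
def Claim_equal_solution : Prop := ∀ (myString : String), Dom_solution myString → Spec_solution myString (solution myString)

-- ===== LEMMAS AND PROOFS =====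

-- str.replace with a single-char pattern is a pointwise map
theorem replace_go_single (c d : Char) (l acc : List Char) (fuel : Nat) (h : l.length ≤ fuel) :
    PySem.Chars.replace.go [c] [d] fuel l acc
      = acc.reverse ++ l.map (fun x => if x = c then d else x) := by
  induction l generalizing fuel acc with
  | nil =>
    cases fuel <;> simp [PySem.Chars.replace.go]
  | cons x t ih =>
    cases fuel with
    | zero => simp at h
    | succ n =>
      simp only [List.length_cons, Nat.succ_le_succ_iff] at h
      simp only [PySem.Chars.replace.go]
      by_cases hx : x = c
      · subst hx
        have hp : List.isPrefixOf [x] (x :: t) = true := by simp [List.isPrefixOf]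
        rw [if_pos hp]
        simp only [List.length_singleton, List.drop_succ_cons, List.drop_zero,
          List.reverse_singleton, List.singleton_append]
        rw [ih (d :: acc) n h]
        simp
      · have hp' : List.isPrefixOf [c] (x :: t) = false := by
          simp [List.isPrefixOf]; intro he; exact absurd he.symm hx
        rw [if_neg (by simp [hp'])]
        rw [ih (x :: acc) n h]
        simp [hx]

theorem replace_single (c d : Char) (l : List Char) :
    PySem.Chars.replace l [c] [d] = l.map (fun x => if x = c then d else x) := by
  simp only [PySem.Chars.replace, List.isEmpty_cons, Bool.false_eq_true, if_false]
  exact replace_go_single c d l [] l.length le_rfl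

-- a character whose lowercase is 'a' uppercases to 'A'
theorem lowerChar_eq_a_imp (ch : Char) (h : PySem.Chars.lowerChar ch = 'a') :
    PySem.Chars.upperChar ch = 'A' := by
  unfold PySem.Chars.lowerChar at h
  by_cases hu : PySem.Chars.isupper ch = true
  · rw [if_pos hu] at h
    have hch : ch = 'A' := by
      unfold PySem.Chars.isupper at hu
      simp only [Bool.and_eq_true, decide_eq_true_eq, Char.le_def, UInt32.le_iff_toNat_le] at hu
      have hA : ('A').val.toNat = 65 := by decide
      have hZ : ('Z').val.toNat = 90 := by decide
      rw [hA, hZ] at hu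
      have hb : 65 ≤ ch.toNat ∧ ch.toNat ≤ 90 := by simp only [Char.toNat]; exact hu
      have hv : (ch.toNat + 32).isValidChar := Or.inl (by omega)
      have ha : ('a').toNat = 97 := by decide
      have h1 : ch.toNat + 32 = 97 := by
        have h0 := congrArg Char.toNat h
        rw [Char.toNat_ofNat, if_pos hv, ha] at h0
        exact h0
      have h2 : ch.val.toNat = 65 := by
        simp only [Char.toNat] at h1
        omega
      apply Char.ext
      apply UInt32.toNat_inj.mp
      rw [h2, hA]
    subst hch; decide
  · rw [if_neg hu] at h
    subst h; decide

-- ===== VERDICT (by name: the statement is the Claim_ definition above) =====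
theorem solution_spec : Claim_equal_solution := by
  intro s _
  unfold Spec_solution solution solution_alt
  refine String.toList_inj.mp ?_
  rw [String.toList_ofList, PySem.Str.toList_replace, PySem.Str.toList_lower]
  rw [show ("a" : String).toList = ['a'] from rfl, show ("A" : String).toList = ['A'] from rfl]
  rw [replace_single 'a' 'A']
  rw [PySem.List.foldl_pyRange_zero_pyGetD' s.toList ' '
    (fun acc c => if PySem.Chars.lowerChar c = 'a' then acc ++ [PySem.Chars.upperChar c]
      else acc ++ [PySem.Chars.lowerChar c]) []]
  have hf : ∀ (acc : List Char) (c : Char),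
      (if PySem.Chars.lowerChar c = 'a' then acc ++ [PySem.Chars.upperChar c]
        else acc ++ [PySem.Chars.lowerChar c])
      = acc ++ [if PySem.Chars.lowerChar c = 'a' then PySem.Chars.upperChar c
        else PySem.Chars.lowerChar c] := by
    intro acc c; split <;> rfl
  simp only [hf, PySem.List.foldl_append_singleton_eq_map, List.nil_append,
    PySem.Chars.lower, List.map_map]
  refine List.map_congr_left ?_
  intro c _
  by_cases h : PySem.Chars.lowerChar c = 'a'
  · simp [h, lowerChar_eq_a_imp c h]
  · simp [h]
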